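-- pv_equiv track=rewrite | github.com/ChanwooCho/FLAIR | ml-flair/benchmark/tool.py | delete_credit_zero
-- ===== SOURCE A (Python) =====
-- def delete_credit_zero(user_credits: dict):
--
--     delete_id_list = []
--
--     for user_id in user_credits:
--         if user_credits[user_id] == 0:
--             delete_id_list.append(user_id)
--
--     for user_id in delete_id_list:
--         del(user_credits[user_id])
--
--     return user_credits
-- ===== SOURCE B (Python) =====
-- def delete_credit_zero(user_credits: dict):
--     kept = {k: v for k, v in user_credits.items() if v != 0}
--     user_credits.clear()
--     user_credits.update(kept)
--     return user_credits
-- ===== Notes on version B (the rewrite author's own statement) =====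
-- stated objective: simpler
-- what changed: B keeps the nonzero entries with a single filtering comprehension and repopulates the same dict (clear+update), instead of A's two passes that first collect the zero-valued keys and then delete them one by one.
import Mathlib
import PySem

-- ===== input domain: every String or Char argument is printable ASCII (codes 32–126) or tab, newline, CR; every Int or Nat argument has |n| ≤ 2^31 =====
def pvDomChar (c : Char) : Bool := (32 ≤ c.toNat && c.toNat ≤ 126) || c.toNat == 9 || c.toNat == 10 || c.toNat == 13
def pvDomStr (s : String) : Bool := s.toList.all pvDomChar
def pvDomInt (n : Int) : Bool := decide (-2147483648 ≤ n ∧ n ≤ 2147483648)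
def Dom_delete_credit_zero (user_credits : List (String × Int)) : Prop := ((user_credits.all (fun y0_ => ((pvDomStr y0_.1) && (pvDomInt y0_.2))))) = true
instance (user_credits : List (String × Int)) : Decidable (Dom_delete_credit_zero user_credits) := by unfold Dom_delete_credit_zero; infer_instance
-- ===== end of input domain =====

-- B keeps the nonzero entries with one filtering pass and repopulates the dict, instead of
-- A's collect-zero-keys-then-delete two-pass scheme; both mutate the argument dict in place
-- in Python, and the equivalence proved here is about the returned mapping.


-- ===== PORT A =====
-- for user_id in user_credits: if user_credits[user_id] == 0: delete_id_list.append(user_id)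
-- for user_id in delete_id_list: del(user_credits[user_id])
-- return user_credits
def delete_credit_zero (user_credits : List (String × Int)) : List (String × Int) :=
  let d := PySem.Dict.mk user_credits
  let delete_id_list :=
    d.keys.foldl (fun acc user_id =>
      if d.get? user_id == some 0 then acc ++ [user_id] else acc) []
  (delete_id_list.foldl (fun dd user_id => dd.erase user_id) d).items

-- ===== PORT B =====
-- kept = {k: v for k, v in user_credits.items() if v != 0}; clear+update; return user_credits
def delete_credit_zero_alt (user_credits : List (String × Int)) : List (String × Int) :=
  user_credits.filter (fun p => decide (p.2 ≠ 0))

-- ===== PRECONDITION & SPEC =====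
-- The association list encodes a Python dict, whose keys are necessarily distinct;
-- Pre_ states exactly that representation invariant (no input a Python caller can build is excluded).
def Pre_delete_credit_zero (user_credits : List (String × Int)) : Prop :=
  (user_credits.map (·.1)).Nodup
instance (user_credits : List (String × Int)) : Decidable (Pre_delete_credit_zero user_credits) := by
  unfold Pre_delete_credit_zero; infer_instance

def pvWitness_delete_credit_zero : (List (String × Int)) := [("a", 3), ("b", 0), ("c", -1)]

def Spec_delete_credit_zero (user_credits : List (String × Int)) (out : List (String × Int)) : Prop := out = delete_credit_zero_alt user_credits
instance (user_credits : List (String × Int)) (out : List (String × Int)) : Decidable (Spec_delete_credit_zero user_credits out) := by unfold Spec_delete_credit_zero; infer_instance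

-- ===== CLAIM (what is proved, stated in full; the proofs are below) =====
def Claim_equal_delete_credit_zero : Prop := ∀ (user_credits : List (String × Int)), Dom_delete_credit_zero user_credits → Pre_delete_credit_zero user_credits → Spec_delete_credit_zero user_credits (delete_credit_zero user_credits)

-- ===== LEMMAS AND PROOFS =====

-- folding `erase` over a list of keys filters the items by non-membership of the key
theorem eraseFold_items (ks : List String) (l : List (String × Int)) :
    (ks.foldl (fun dd k => PySem.Dict.erase dd k) (PySem.Dict.mk l)).items
      = l.filter (fun p => !ks.contains p.1) := by
  induction ks generalizing l with
  | nil => simp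
  | cons k ks ih =>
    have hstep : (PySem.Dict.mk l).erase k
        = PySem.Dict.mk (l.filter (fun p => !p.1 == k)) := rfl
    rw [List.foldl_cons, hstep, ih, List.filter_filter]
    refine List.filter_congr (fun p _ => ?_)
    simp only [List.contains_cons]
    cases h : p.1 == k <;> simp

theorem delete_credit_zero_spec : Claim_equal_delete_credit_zero := by
  intro uc _ hpre
  unfold Spec_delete_credit_zero delete_credit_zero delete_credit_zero_alt
  simp only [PySem.List.foldl_append_if_eq_filter, List.nil_append, eraseFold_items]
  refine List.filter_congr (fun p hp => ?_)
  have hnd : (PySem.Dict.mk uc).keys.Nodup := hpre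
  have hget : (PySem.Dict.mk uc).get? p.1 = some p.2 :=
    PySem.Dict.get?_of_mem_items (PySem.Dict.mk uc) hp hnd
  by_cases hz : p.2 = 0
  · simp only [hz]
    simp
    exact ⟨⟨p.2, by simpa using hp⟩, by rw [hget]; simp [hz]⟩
  · simp [hz]
    intro x hx
    rw [hget]
    simp [hz]
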